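-- pv_equiv track=rewrite | github.com/MrBrantCode/unitest_baseline | mut_generate/mist_train_taco/taco_17517/solution.py | minimum_time_to_reach
-- ===== SOURCE A (Python) =====
-- def minimum_time_to_reach(N: int) -> int:
--     """
--     Calculate the minimum time required for Utkarsh to reach the city at x = N.
--
--     Parameters:
--     N (int): The target position on the x-axis.
--
--     Returns:
--     int: The minimum time required to reach the target position.
--     """
--     def asum(n):
--         return n * (n + 1) // 2
--
--     low = 0
--     high = 10000000000
--
--     while low != high:
--         mid = (low + high) // 2
--         sm = asum(mid)
--         spm = asum(mid - 1)
--
--         if sm >= N and spm < N: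
--             return mid
--
--         if sm < N:
--             low = mid + 1
--         else:
--             high = mid - 1
--
--     return low
-- ===== SOURCE B (Python) =====
-- def minimum_time_to_reach(N: int) -> int:
--     t = 0
--     while t * (t + 1) // 2 < N:
--         t += 1
--     return t
-- ===== Notes on version B (the rewrite author's own statement) =====
-- stated objective: simpler
-- what changed: Replaces the binary search over [0, 10^10] (with its early-return window test and hardcoded cap) by a plain linear scan returning the first t with t*(t+1)//2 >= N.
import Mathlib
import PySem

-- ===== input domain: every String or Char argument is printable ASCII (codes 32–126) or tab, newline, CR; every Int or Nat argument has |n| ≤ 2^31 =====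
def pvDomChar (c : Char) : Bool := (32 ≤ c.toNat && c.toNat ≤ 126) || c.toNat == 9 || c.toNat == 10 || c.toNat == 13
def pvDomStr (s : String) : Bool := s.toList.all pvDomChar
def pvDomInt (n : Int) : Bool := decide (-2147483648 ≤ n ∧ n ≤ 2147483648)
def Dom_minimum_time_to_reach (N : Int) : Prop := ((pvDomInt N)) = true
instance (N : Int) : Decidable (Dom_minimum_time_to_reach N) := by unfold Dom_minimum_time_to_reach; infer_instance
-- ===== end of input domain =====

-- B replaces A's binary search over [0, 10^10] by a plain linear scan for the
-- first t with t*(t+1)//2 >= N (objective: simpler; not faster).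

-- ===== PORT A =====
-- A's inner helper: asum(n) = n*(n+1)//2
def pvAsum (n : Int) : Int := PySem.Int.floordiv (n * (n + 1)) 2

-- A's while-loop; fuel only bounds the number of iterations (the initial fuel
-- 10^10 equals the initial span high-low, which strictly shrinks each pass,
-- so fuel is never exhausted on any input the claim covers).
def pvALoop (fuel : Nat) (N low high : Int) : Int :=
  match fuel with
  | 0 => low
  | fuel + 1 =>
    if low = high then low
    else
      let mid := PySem.Int.floordiv (low + high) 2
      let sm := pvAsum mid
      let spm := pvAsum (mid - 1)
      if sm ≥ N ∧ spm < N then mid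
      else if sm < N then pvALoop fuel N (mid + 1) high
      else pvALoop fuel N low (mid - 1)

def minimum_time_to_reach (N : Int) : Int := pvALoop 10000000000 N 0 10000000000

-- ===== PORT B =====
-- for any integer t, 2*t ≤ t*(t+1); cited by pvBLoop's termination proof
theorem pv_two_mul_le (t : Int) : 2 * t ≤ t * (t + 1) := by
  rcases le_or_gt t 0 with h | h
  · nlinarith [mul_self_nonneg t]
  · nlinarith

-- B's while-loop: increment t until t*(t+1)//2 ≥ N
def pvBLoop (N t : Int) : Int :=
  if PySem.Int.floordiv (t * (t + 1)) 2 < N then pvBLoop N (t + 1) else t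
termination_by (N - t).toNat
decreasing_by
  rename_i h
  have h2 : t * (t + 1) < N * 2 := by
    rw [PySem.Int.floordiv_lt_iff_lt_mul (by norm_num)] at h
    exact h
  have h3 := pv_two_mul_le t
  omega

def minimum_time_to_reach_alt (N : Int) : Int := pvBLoop N 0

-- ===== PRECONDITION & SPEC =====
def Spec_minimum_time_to_reach (N : Int) (out : Int) : Prop := out = minimum_time_to_reach_alt N
instance (N : Int) (out : Int) : Decidable (Spec_minimum_time_to_reach N out) := by unfold Spec_minimum_time_to_reach; infer_instance

-- ===== CLAIM (what is proved, stated in full; the proofs are below) =====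
def Claim_equal_minimum_time_to_reach : Prop := ∀ (N : Int), Dom_minimum_time_to_reach N → Spec_minimum_time_to_reach N (minimum_time_to_reach N)

-- ===== LEMMAS AND PROOFS =====

theorem pvAsum_twice (n : Int) : 2 * pvAsum n = n * (n + 1) := by
  obtain ⟨k, hk⟩ := Int.even_mul_succ_self n
  have h : PySem.Int.floordiv (n * (n + 1)) 2 = k := by
    rw [PySem.Int.floordiv_eq_iff_of_pos (by norm_num), hk]
    omega
  rw [pvAsum, h, hk]
  omega

theorem pvAsum_nonneg (n : Int) : 0 ≤ pvAsum n := by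
  have h := pvAsum_twice n
  have h2 : 0 ≤ n * (n + 1) := by
    rcases le_or_gt 0 n with hn | hn
    · exact mul_nonneg hn (by omega)
    · nlinarith
  omega

theorem pvAsum_self_le (n : Int) : n ≤ pvAsum n := by
  have h := pvAsum_twice n
  have h2 := pv_two_mul_le n
  omega

theorem pvAsum_mono {a b : Int} (ha : 0 ≤ a) (hab : a ≤ b) : pvAsum a ≤ pvAsum b := by
  have h1 := pvAsum_twice a
  have h2 := pvAsum_twice b
  have h3 : a * (a + 1) ≤ b * (b + 1) := by nlinarith
  omega

-- B's loop returns the first t' ≥ t with asum t' ≥ N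
theorem pvBLoop_spec (N t : Int) (ht : 0 ≤ t)
    (hmin : ∀ s, 0 ≤ s → s < t → pvAsum s < N) :
    0 ≤ pvBLoop N t ∧ N ≤ pvAsum (pvBLoop N t) ∧
      ∀ s, 0 ≤ s → s < pvBLoop N t → pvAsum s < N := by
  revert ht hmin
  fun_induction pvBLoop N t with
  | case1 t h ih =>
    intro ht hmin
    exact ih (by omega) (by
      intro s hs0 hs
      rcases (by omega : s < t ∨ t ≤ s) with hst | hst
      · exact hmin s hs0 hst
      · have hst' : s = t := by omega
        rw [hst']; exact h)
  | case2 t h =>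
    intro ht hmin
    have h' : N ≤ pvAsum t := by
      have : ¬ pvAsum t < N := h
      omega
    exact ⟨ht, h', hmin⟩

-- A's binary search homes in on the value r that B characterises (N ≥ 1 case)
theorem pvALoop_eq (N r : Int) (hN : 1 ≤ N) (hr2 : N ≤ pvAsum r)
    (hr3 : ∀ s, 0 ≤ s → s < r → pvAsum s < N) :
    ∀ (fuel : Nat) (low high : Int), 0 ≤ low → low ≤ r → r ≤ high →
      (high - low).toNat ≤ fuel → pvALoop fuel N low high = r := by
  intro fuel
  induction fuel with
  | zero =>
    intro low high h0 h1 h2 hf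
    simp only [pvALoop]
    omega
  | succ fuel ih =>
    intro low high h0 h1 h2 hf
    by_cases hlh : low = high
    · simp only [pvALoop, if_pos hlh]
      omega
    · have hlt : low < high := by omega
      simp only [pvALoop, if_neg hlh]
      set mid := PySem.Int.floordiv (low + high) 2 with hmid
      have hmlo : low ≤ mid := by
        rw [hmid, PySem.Int.le_floordiv_iff_mul_le (by norm_num)]
        omega
      have hmhi : mid < high := by
        rw [hmid, PySem.Int.floordiv_lt_iff_lt_mul (by norm_num)]
        omega
      by_cases hc1 : pvAsum mid ≥ N ∧ pvAsum (mid - 1) < N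
      · rw [if_pos hc1]
        -- mid = r
        have hrm : r ≤ mid := by
          by_contra hcon
          have := hr3 mid (by omega) (by omega)
          omega
        have hmr : mid ≤ r := by
          by_contra hcon
          have := pvAsum_mono (a := r) (b := mid - 1) (by omega) (by omega)
          omega
        omega
      · rw [if_neg hc1]
        by_cases hc2 : pvAsum mid < N
        · rw [if_pos hc2]
          have hmr : mid < r := by
            by_contra hcon
            have := pvAsum_mono (a := r) (b := mid) (by omega) (by omega)
            omega
          exact ih (mid + 1) high (by omega) (by omega) h2 (by omega)
        · rw [if_neg hc2]
          have hspm : N ≤ pvAsum (mid - 1) := by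
            rcases not_and_or.mp hc1 with h | h
            · omega
            · omega
          have hrm : r ≤ mid - 1 := by
            by_contra hcon
            rcases le_or_gt 0 (mid - 1) with hm0 | hm0
            · have := hr3 (mid - 1) hm0 (by omega)
              omega
            · -- mid = 0, so asum (mid-1) = asum (-1) = 0 < 1 ≤ N
              have hm : mid = 0 := by omega
              rw [hm] at hspm
              have : pvAsum (0 - 1) = 0 := by decide
              omega
          exact ih low (mid - 1) h0 (by omega) hrm (by omega)

-- for N ≤ 0 every comparison in A's loop is forced, so the run equals the N = 0 run
theorem pvALoop_nonpos (N : Int) (hN : N ≤ 0) :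
    ∀ (fuel : Nat) (low high : Int), pvALoop fuel N low high = pvALoop fuel 0 low high := by
  intro fuel
  induction fuel with
  | zero => intro low high; rfl
  | succ fuel ih =>
    intro low high
    by_cases h : low = high
    · simp only [pvALoop, if_pos h]
    · simp only [pvALoop, if_neg h]
      have a1 := pvAsum_nonneg (PySem.Int.floordiv (low + high) 2)
      have a2 := pvAsum_nonneg (PySem.Int.floordiv (low + high) 2 - 1)
      rw [if_neg (by omega), if_neg (by omega), if_neg (by omega), if_neg (by omega)]
      exact ih low (PySem.Int.floordiv (low + high) 2 - 1)

theorem pvALoop_zero_run : pvALoop 10000000000 0 0 10000000000 = 0 := by decide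

theorem pvBLoop_nonpos (N : Int) (hN : N ≤ 0) : pvBLoop N 0 = 0 := by
  rw [pvBLoop]
  rw [if_neg]
  have : PySem.Int.floordiv (0 * (0 + 1)) 2 = 0 := by decide
  omega

-- ===== VERDICT (by name: the statement is the Claim_ definition above) =====
theorem minimum_time_to_reach_spec : Claim_equal_minimum_time_to_reach := by
  intro N hDom
  show minimum_time_to_reach N = minimum_time_to_reach_alt N
  have hDom' : -2147483648 ≤ N ∧ N ≤ 2147483648 := by
    simpa [Dom_minimum_time_to_reach, pvDomInt] using hDom
  rcases le_or_gt N 0 with hN | hN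
  · rw [minimum_time_to_reach, pvALoop_nonpos N hN, pvALoop_zero_run,
      minimum_time_to_reach_alt, pvBLoop_nonpos N hN]
  · obtain ⟨hr1, hr2, hr3⟩ := pvBLoop_spec N 0 le_rfl (by intro s h1 h2; omega)
    have hbound : pvBLoop N 0 ≤ 2147483648 := by
      by_contra hcon
      have h1 := hr3 2147483648 (by norm_num) (by omega)
      have h2 := pvAsum_self_le 2147483648
      omega
    exact pvALoop_eq N (pvBLoop N 0) hN hr2 hr3 10000000000 0 10000000000
      le_rfl hr1 (by omega) (by norm_num)
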